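-- pv_equiv track=rewrite | github.com/fejese/advent-of-code-2017 | day-03/solv-2.py | solve
-- ===== SOURCE A (Python) =====
-- from collections import defaultdict
-- from typing import Dict
--
-- ROT_LEFT: Dict[complex, complex] = {
--     complex(1, 0): complex(0, -1),
--     complex(0, -1): complex(-1, 0),
--     complex(-1, 0): complex(0, 1),
--     complex(0, 1): complex(1, 0),
-- }
--
-- def solve(target: int) -> int:
--     grid: Dict[complex, int] = defaultdict(int)
--     grid[complex(0, 0)] = 1
--     grid[complex(1, 0)] = 1
--     pos = complex(1, 0)
--     direction = 1
--
--     while True: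
--         left_pos = pos + ROT_LEFT[direction]
--         if grid[left_pos] == 0:
--             direction = ROT_LEFT[direction]
--
--         pos += direction
--
--         val = sum(
--             grid[pos + complex(di, dj)]
--             for di in (-1, 0, 1)
--             for dj in (-1, 0, 1)
--             if di != 0 or dj != 0
--         )
--         grid[pos] = val
--
--         # print_grid(grid, pos)
--
--         if val > target:
--             return val
-- ===== SOURCE B (Python) =====
-- def solve(target: int) -> int:
--     # Segment-length spiral walk: lengths 1,2,2,3,3,... with directions
--     # cycling up,left,down,right; dict keyed by (x, y) integer tuples.
--     grid = {(0, 0): 1, (1, 0): 1}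
--     x, y = 1, 0
--     dirs = ((0, -1), (-1, 0), (0, 1), (1, 0))
--     d = 0
--     length = 1
--     while True:
--         for _ in range(length):
--             dx, dy = dirs[d]
--             x += dx
--             y += dy
--             val = sum(grid.get((x + i, y + j), 0)
--                       for i in (-1, 0, 1) for j in (-1, 0, 1) if (i, j) != (0, 0))
--             grid[(x, y)] = val
--             if val > target:
--                 return val
--         d = (d + 1) % 4
--         if d % 2 == 1:
--             length += 1
-- ===== Notes on version B (the rewrite author's own statement) =====
-- stated objective: alternative
-- what changed: B replaces A's grid-probing turn rule (turn left whenever the cell to the left is still empty, checked by a dict lookup each step) with the arithmetic spiral segment pattern (segment lengths 1,2,2,3,3,... with four directions cycling), keeping a plain tuple-keyed dict instead of complex-number keys.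
import Mathlib
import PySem

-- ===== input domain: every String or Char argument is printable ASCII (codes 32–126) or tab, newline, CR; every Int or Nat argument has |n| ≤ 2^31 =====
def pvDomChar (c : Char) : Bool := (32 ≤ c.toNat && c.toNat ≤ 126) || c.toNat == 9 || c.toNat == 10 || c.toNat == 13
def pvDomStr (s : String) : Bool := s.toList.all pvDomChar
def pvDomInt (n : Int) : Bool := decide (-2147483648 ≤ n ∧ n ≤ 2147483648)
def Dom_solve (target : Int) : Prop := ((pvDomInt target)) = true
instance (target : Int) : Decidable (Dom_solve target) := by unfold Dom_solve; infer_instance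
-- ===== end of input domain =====

-- B walks the spiral by the arithmetic segment-length pattern (1,2,2,3,3,... with four directions
-- cycling) instead of A's grid-probing "turn left when the left cell is empty" rule (alternative
-- decomposition, same cost). Both ports carry a fuel bound of 155 visited cells (23 segments),
-- enough to exceed any target admitted by Dom_solve; the fuel only totalises the while-loops.

-- ===== PORT A =====
-- ROT_LEFT lookup (A's direction is always one of the four keys; the final branch is ROT_LEFT[(0,1)])
def rotLeftA (d : Int × Int) : Int × Int :=
  if d = ((1 : Int), (0 : Int)) then (0, -1)
  else if d = ((0 : Int), (-1 : Int)) then (-1, 0)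
  else if d = ((-1 : Int), (0 : Int)) then (0, 1)
  else (1, 0)

-- sum(grid[pos + complex(di, dj)] for di in (-1,0,1) for dj in (-1,0,1) if di != 0 or dj != 0)
-- (defaultdict reads of absent keys yield 0; the 0-entries they insert never affect any value)
def neighSumA (g : PySem.Dict (Int × Int) Int) (p : Int × Int) : Int :=
  (([(-1 : Int), 0, 1].flatMap fun di =>
    [(-1 : Int), 0, 1].filterMap fun dj =>
      if di ≠ 0 ∨ dj ≠ 0 then some (g.getD (p.1 + di, p.2 + dj) 0) else none)).sum

-- one iteration of A's while-loop: (grid, pos, direction) ↦ ((grid', pos', direction'), val)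
def stepA (s : PySem.Dict (Int × Int) Int × (Int × Int) × (Int × Int)) :
    (PySem.Dict (Int × Int) Int × (Int × Int) × (Int × Int)) × Int :=
  let (g, pos, dir) := s
  let dir' := if g.getD (pos.1 + (rotLeftA dir).1, pos.2 + (rotLeftA dir).2) 0 = 0
              then rotLeftA dir else dir
  let pos' := (pos.1 + dir'.1, pos.2 + dir'.2)
  let v := neighSumA g pos'
  ((g.insert pos' v, pos', dir'), v)

def loopA : Nat → (PySem.Dict (Int × Int) Int × (Int × Int) × (Int × Int)) → Int → Int
  | 0, _, _ => 0
  | n + 1, s, t =>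
    let (s', v) := stepA s
    if v > t then v else loopA n s' t

def initGridA : PySem.Dict (Int × Int) Int :=
  (PySem.Dict.empty.insert ((0 : Int), (0 : Int)) 1).insert ((1 : Int), (0 : Int)) 1

def solve (target : Int) : Int :=
  loopA 155 (initGridA, ((1 : Int), (0 : Int)), ((1 : Int), (0 : Int))) target

-- ===== PORT B =====
def dirsB : List (Int × Int) := [(0, -1), (-1, 0), (0, 1), (1, 0)]

-- sum(grid.get((x+i, y+j), 0) for i in (-1,0,1) for j in (-1,0,1) if (i,j) != (0,0))
def neighSumB (g : PySem.Dict (Int × Int) Int) (x y : Int) : Int :=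
  (([(-1 : Int), 0, 1].flatMap fun i =>
    [(-1 : Int), 0, 1].filterMap fun j =>
      if (i, j) ≠ ((0 : Int), (0 : Int)) then some (g.getD (x + i, y + j) 0) else none)).sum

-- the inner `for _ in range(length)` with its early return
def segB (g : PySem.Dict (Int × Int) Int) (x y : Int) (dxy : Int × Int) :
    Nat → Int → Option Int × PySem.Dict (Int × Int) Int × Int × Int
  | 0, _ => (none, g, x, y)
  | n + 1, t =>
    let x' := x + dxy.1
    let y' := y + dxy.2
    let v := neighSumB g x' y'
    let g' := g.insert (x', y') v
    if v > t then (some v, g', x', y') else segB g' x' y' dxy n t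

def loopB : Nat → PySem.Dict (Int × Int) Int → Int → Int → Int → Int → Int → Int
  | 0, _, _, _, _, _, _ => 0
  | fuel + 1, g, x, y, d, len, t =>
    let dxy := (PySem.List.pyGet? dirsB d).getD (0, 0)
    match segB g x y dxy len.toNat t with
    | (some v, _, _, _) => v
    | (none, g', x', y') =>
      let d' := PySem.Int.mod (d + 1) 4
      let len' := if PySem.Int.mod d' 2 = 1 then len + 1 else len
      loopB fuel g' x' y' d' len' t

def initGridB : PySem.Dict (Int × Int) Int :=
  (PySem.Dict.empty.insert ((0 : Int), (0 : Int)) 1).insert ((1 : Int), (0 : Int)) 1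

def solve_alt (target : Int) : Int :=
  loopB 23 initGridB 1 0 0 1 target

-- ===== PRECONDITION & SPEC =====
def Spec_solve (target : Int) (out : Int) : Prop := out = solve_alt target
instance (target : Int) (out : Int) : Decidable (Spec_solve target out) := by unfold Spec_solve; infer_instance

-- ===== CLAIM (what is proved, stated in full; the proofs are below) =====
def Claim_equal_solve : Prop := ∀ (target : Int), Dom_solve target → Spec_solve target (solve target)

-- ===== LEMMAS AND PROOFS =====

set_option maxRecDepth 100000

-- first element > t of a list, else 0
def firstGt : List Int → Int → Int
  | [], _ => 0
  | v :: vs, t => if v > t then v else firstGt vs t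

-- the sequence of values A writes, ignoring the exit test
def runA : Nat → (PySem.Dict (Int × Int) Int × (Int × Int) × (Int × Int)) → List Int
  | 0, _ => []
  | n + 1, s =>
    let (s', v) := stepA s
    v :: runA n s'

-- the segment trace B writes, ignoring the exit test
def runSegB (g : PySem.Dict (Int × Int) Int) (x y : Int) (dxy : Int × Int) :
    Nat → List Int × PySem.Dict (Int × Int) Int × Int × Int
  | 0 => ([], g, x, y)
  | n + 1 =>
    let x' := x + dxy.1
    let y' := y + dxy.2
    let v := neighSumB g x' y'
    let (vs, g', x'', y'') := runSegB (g.insert (x', y') v) x' y' dxy n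
    (v :: vs, g', x'', y'')

def runB : Nat → PySem.Dict (Int × Int) Int → Int → Int → Int → Int → List Int
  | 0, _, _, _, _, _ => []
  | fuel + 1, g, x, y, d, len =>
    let dxy := (PySem.List.pyGet? dirsB d).getD (0, 0)
    let (vs, g', x', y') := runSegB g x y dxy len.toNat
    let d' := PySem.Int.mod (d + 1) 4
    let len' := if PySem.Int.mod d' 2 = 1 then len + 1 else len
    vs ++ runB fuel g' x' y' d' len'

theorem firstGt_append_pos (t : Int) (l r : List Int) (h : ∃ v ∈ l, v > t) :
    firstGt (l ++ r) t = firstGt l t := by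
  induction l with
  | nil => simp at h
  | cons a l ih =>
    simp only [List.cons_append, firstGt]
    by_cases ha : a > t
    · simp [ha]
    · simp only [ha, ite_false]
      rcases h with ⟨v, hv, hvt⟩
      rcases List.mem_cons.mp hv with h1 | h1
      · exact absurd (h1 ▸ hvt) ha
      · exact ih ⟨v, h1, hvt⟩

theorem firstGt_append_neg (t : Int) (l r : List Int) (h : ¬ ∃ v ∈ l, v > t) :
    firstGt (l ++ r) t = firstGt r t := by
  induction l with
  | nil => simp
  | cons a l ih =>
    simp only [List.cons_append, firstGt]
    have ha : ¬ a > t := fun hgt => h ⟨a, List.mem_cons_self .., hgt⟩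
    simp only [ha, ite_false]
    exact ih fun ⟨v, hv, hvt⟩ => h ⟨v, List.mem_cons_of_mem _ hv, hvt⟩

theorem loopA_char (n : Nat) : ∀ s t, loopA n s t = firstGt (runA n s) t := by
  induction n with
  | zero => intro s t; rfl
  | succ n ih =>
    intro s t
    simp only [loopA, runA, firstGt]
    split <;> simp [*]

theorem segB_pos (n : Nat) : ∀ g x y dxy t, (∃ v ∈ (runSegB g x y dxy n).1, v > t) →
    (segB g x y dxy n t).1 = some (firstGt (runSegB g x y dxy n).1 t) := by
  induction n with
  | zero => intro g x y dxy t h; simp [runSegB] at h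
  | succ n ih =>
    intro g x y dxy t h
    rw [segB, runSegB] at *
    rcases hr : runSegB (g.insert (x + dxy.1, y + dxy.2) (neighSumB g (x + dxy.1) (y + dxy.2)))
        (x + dxy.1) (y + dxy.2) dxy n with ⟨vs, g2, x2, y2⟩
    rw [hr] at h
    simp only at h ⊢
    by_cases hv : neighSumB g (x + dxy.1) (y + dxy.2) > t
    · simp [hv, firstGt]
    · have h' : ∃ v ∈ vs, v > t := by
        rcases h with ⟨v, hv2, hvt⟩
        rcases List.mem_cons.mp hv2 with h1 | h1
        · exact absurd (h1 ▸ hvt) hv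
        · exact ⟨v, h1, hvt⟩
      have := ih (g.insert (x + dxy.1, y + dxy.2) (neighSumB g (x + dxy.1) (y + dxy.2)))
        (x + dxy.1) (y + dxy.2) dxy t
      rw [hr] at this
      simp only at this
      simp [hv, firstGt, this h']

theorem segB_neg (n : Nat) : ∀ g x y dxy t, (¬ ∃ v ∈ (runSegB g x y dxy n).1, v > t) →
    segB g x y dxy n t = (none, (runSegB g x y dxy n).2) := by
  induction n with
  | zero => intro g x y dxy t _; simp [segB, runSegB]
  | succ n ih =>
    intro g x y dxy t h
    rw [segB, runSegB] at *
    rcases hr : runSegB (g.insert (x + dxy.1, y + dxy.2) (neighSumB g (x + dxy.1) (y + dxy.2)))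
        (x + dxy.1) (y + dxy.2) dxy n with ⟨vs, g2, x2, y2⟩
    rw [hr] at h
    simp only at h ⊢
    have hv : ¬ neighSumB g (x + dxy.1) (y + dxy.2) > t :=
      fun hgt => h ⟨_, List.mem_cons_self .., hgt⟩
    have := ih (g.insert (x + dxy.1, y + dxy.2) (neighSumB g (x + dxy.1) (y + dxy.2)))
      (x + dxy.1) (y + dxy.2) dxy t
    rw [hr] at this
    simp only at this
    simp [hv, this fun ⟨v, hv2, hvt⟩ => h ⟨v, List.mem_cons_of_mem _ hv2, hvt⟩]

theorem loopB_char (fuel : Nat) : ∀ g x y d len t,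
    loopB fuel g x y d len t = firstGt (runB fuel g x y d len) t := by
  induction fuel with
  | zero => intro g x y d len t; rfl
  | succ fuel ih =>
    intro g x y d len t
    simp only [loopB, runB]
    by_cases he : ∃ v ∈ (runSegB g x y ((PySem.List.pyGet? dirsB d).getD (0, 0)) len.toNat).1, v > t
    · have h1 := segB_pos len.toNat g x y ((PySem.List.pyGet? dirsB d).getD (0, 0)) t he
      rcases hs : segB g x y ((PySem.List.pyGet? dirsB d).getD (0, 0)) len.toNat t
        with ⟨o, g2, x2, y2⟩
      rw [hs] at h1
      simp only at h1
      subst h1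
      rcases hr : runSegB g x y ((PySem.List.pyGet? dirsB d).getD (0, 0)) len.toNat
        with ⟨vs, g3, x3, y3⟩
      rw [hr] at he
      simp only at he ⊢
      simp [firstGt_append_pos t vs _ he]
    · have h1 := segB_neg len.toNat g x y ((PySem.List.pyGet? dirsB d).getD (0, 0)) t he
      rcases hr : runSegB g x y ((PySem.List.pyGet? dirsB d).getD (0, 0)) len.toNat
        with ⟨vs, g3, x3, y3⟩
      rw [hr] at he
      simp only at he h1 ⊢
      rw [h1, hr]
      simp [firstGt_append_neg t vs _ he, ih]

set_option maxHeartbeats 4000000 in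
theorem runs_eq :
    runA 155 (initGridA, ((1 : Int), (0 : Int)), ((1 : Int), (0 : Int))) =
    runB 23 initGridB 1 0 0 1 := by decide

-- ===== VERDICT (by name: the statement is the Claim_ definition above) =====
theorem solve_spec : Claim_equal_solve := by
  intro target _
  unfold Spec_solve solve solve_alt
  rw [loopA_char, loopB_char, runs_eq]
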